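-- pv_equiv track=rewrite | github.com/aliblong/describe-it | descrive/__init__.py | reassociate_orphaned_descriptor
-- ===== SOURCE A (Python) =====
-- def reassociate_orphaned_descriptor(orphaned_descriptor, features_descriptors):
--     most_occurrences = 0
--     for _, feature_descriptors in features_descriptors.items():
--         for i, (feature_descriptor, mult) in enumerate(feature_descriptors):
--             if orphaned_descriptor == feature_descriptor:
--                 if mult > most_occurrences: most_occurrences = mult
--     for _, feature_descriptors in features_descriptors.items():
--         for i, (feature_descriptor, mult) in enumerate(feature_descriptors):
--             if mult == most_occurrences and orphaned_descriptor == feature_descriptor: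
--                 feature_descriptors[i] = (feature_descriptor, mult + 1)
--                 return True
--     return False
-- ===== SOURCE B (Python) =====
-- def reassociate_orphaned_descriptor(orphaned_descriptor, features_descriptors):
--     best = None
--     for feature_descriptors in features_descriptors.values():
--         for i, (feature_descriptor, mult) in enumerate(feature_descriptors):
--             if feature_descriptor == orphaned_descriptor and (best is None or mult > best[0]):
--                 best = (mult, feature_descriptors, i)
--     if best is None:
--         return False
--     mult, lst, i = best
--     lst[i] = (orphaned_descriptor, mult + 1)
--     return True
-- ===== Notes on version B (the rewrite author's own statement) =====
-- stated objective: simpler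
-- what changed: Replaces A's two full passes (a 0-initialized max pass, then a search pass for an entry whose multiplicity equals that max) by a single pass that tracks the best matching entry and its location and increments it directly; Pre_ excludes inputs where an entry matching the orphaned descriptor carries a negative multiplicity, since multiplicities are occurrence counts and A's 0-initialized max treats such entries accidentally.
-- outside the precondition, e.g. on reassociate_orphaned_descriptor('x', {'f': [('x', -1)]}): A returns False, B returns True
import Mathlib
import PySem

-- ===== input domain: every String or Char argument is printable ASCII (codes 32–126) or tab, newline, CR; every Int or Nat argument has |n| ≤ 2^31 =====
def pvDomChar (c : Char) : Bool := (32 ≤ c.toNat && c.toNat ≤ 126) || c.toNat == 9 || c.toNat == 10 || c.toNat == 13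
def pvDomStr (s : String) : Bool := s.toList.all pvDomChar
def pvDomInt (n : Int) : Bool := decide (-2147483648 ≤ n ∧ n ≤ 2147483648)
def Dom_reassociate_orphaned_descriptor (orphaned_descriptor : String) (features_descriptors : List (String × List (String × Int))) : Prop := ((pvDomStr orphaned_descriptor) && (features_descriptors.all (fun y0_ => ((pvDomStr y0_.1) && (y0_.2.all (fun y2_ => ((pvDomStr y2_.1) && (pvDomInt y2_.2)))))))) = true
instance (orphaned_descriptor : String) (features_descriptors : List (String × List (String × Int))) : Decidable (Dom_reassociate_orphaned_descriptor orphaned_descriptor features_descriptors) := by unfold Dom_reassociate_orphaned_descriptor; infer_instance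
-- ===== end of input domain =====

-- B replaces A's two full passes by one pass that tracks the best matching entry and
-- increments it (objective: simpler). Return-value equivalence only: both Pythons mutate
-- the matched entry in place on success (outside Pre_ A may mutate nothing where B does).

-- ===== PORT A =====
-- pass 1: most_occurrences = max of matching multiplicities, initialized to 0;
-- pass 2: early-return True at the first entry with mult == most_occurrences and a
-- descriptor match (the for/return-True/return-False shape is List.any).
def reassociate_orphaned_descriptor (orphaned_descriptor : String) (features_descriptors : List (String × List (String × Int))) : Bool :=
  let most := features_descriptors.foldl
    (fun acc kv => kv.2.foldl
      (fun a p => if orphaned_descriptor == p.1 then (if p.2 > a then p.2 else a) else a) acc) 0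
  features_descriptors.any (fun kv => kv.2.any (fun p => p.2 == most && orphaned_descriptor == p.1))

-- ===== PORT B =====
-- single pass: best : Option Int (best matching multiplicity so far; the Python also
-- carries the list reference and index for the in-place update, which does not affect
-- the return value), updated on a descriptor match when best is None or mult is strictly
-- larger; True iff a best was found.
def reassociate_orphaned_descriptor_alt (orphaned_descriptor : String) (features_descriptors : List (String × List (String × Int))) : Bool :=
  let best := features_descriptors.foldl
    (fun acc kv => kv.2.foldl
      (fun b p => if p.1 == orphaned_descriptor then
          (match b with
           | none => some p.2
           | some v => if p.2 > v then some p.2 else some v)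
        else b) acc) none
  match best with
  | some _ => true
  | none => false

-- ===== PRECONDITION & SPEC =====
-- Pre_ excludes inputs where an entry matching the orphaned descriptor carries a NEGATIVE
-- multiplicity: multiplicities are occurrence counts, so negative ones lie outside the
-- function's natural domain, and A's 0-initialized max pass treats them accidentally.
def Pre_reassociate_orphaned_descriptor (orphaned_descriptor : String) (features_descriptors : List (String × List (String × Int))) : Prop :=
  features_descriptors.all (fun kv => kv.2.all (fun p => !(p.1 == orphaned_descriptor) || decide (0 ≤ p.2))) = true
instance (orphaned_descriptor : String) (features_descriptors : List (String × List (String × Int))) : Decidable (Pre_reassociate_orphaned_descriptor orphaned_descriptor features_descriptors) := by unfold Pre_reassociate_orphaned_descriptor; infer_instance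

def pvWitness_reassociate_orphaned_descriptor : String × (List (String × List (String × Int))) := ("x", [("f", [("x", 2), ("y", -1)])])

def Spec_reassociate_orphaned_descriptor (orphaned_descriptor : String) (features_descriptors : List (String × List (String × Int))) (out : Bool) : Prop := out = reassociate_orphaned_descriptor_alt orphaned_descriptor features_descriptors
instance (orphaned_descriptor : String) (features_descriptors : List (String × List (String × Int))) (out : Bool) : Decidable (Spec_reassociate_orphaned_descriptor orphaned_descriptor features_descriptors out) := by unfold Spec_reassociate_orphaned_descriptor; infer_instance

-- ===== CLAIM (what is proved, stated in full; the proofs are below) =====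
def Claim_equal_reassociate_orphaned_descriptor : Prop := ∀ (orphaned_descriptor : String) (features_descriptors : List (String × List (String × Int))), Dom_reassociate_orphaned_descriptor orphaned_descriptor features_descriptors → Pre_reassociate_orphaned_descriptor orphaned_descriptor features_descriptors → Spec_reassociate_orphaned_descriptor orphaned_descriptor features_descriptors (reassociate_orphaned_descriptor orphaned_descriptor features_descriptors)

-- ===== LEMMAS AND PROOFS =====

-- the multiplicities of the matching entries, flattened, in traversal order
def pvMatches (od : String) (fs : List (String × List (String × Int))) : List Int :=
  fs.flatMap (fun kv => kv.2.filterMap (fun p => if p.1 == od then some p.2 else none))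

-- the common "fold over the matching multiplicities" shape of one inner loop
theorem pv_foldl_filterMap {β : Type} (od : String) (g : β → Int → β) :
    ∀ (l : List (String × Int)) (a : β),
      l.foldl (fun a p => if p.1 == od then g a p.2 else a) a
        = (l.filterMap (fun p => if p.1 == od then some p.2 else none)).foldl g a := by
  intro l
  induction l with
  | nil => intro a; rfl
  | cons p t ih =>
    intro a
    rw [List.foldl_cons]
    cases h : (p.1 == od) with
    | false =>
      rw [List.filterMap_cons_none (by rw [h]; rfl), if_neg (show ¬(false = true) by decide)]
      exact ih a
    | true =>
      rw [List.filterMap_cons_some (b := p.2) (by rw [h]; rfl)]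
      rw [List.foldl_cons]
      have : (if true = true then g a p.2 else a) = g a p.2 := rfl
      rw [this]
      exact ih (g a p.2)

theorem pv_foldl_flatMap {α β γ : Type} (f : α → List γ) (g : β → γ → β) :
    ∀ (fs : List α) (a : β),
      fs.foldl (fun a x => (f x).foldl g a) a = (fs.flatMap f).foldl g a := by
  intro fs
  induction fs with
  | nil => intro a; rfl
  | cons x t ih => intro a; simp [List.flatMap_cons, List.foldl_append, ih]

-- A's first pass computed over the flattened matches
theorem pvA_most (od : String) (fs : List (String × List (String × Int))) :
    fs.foldl (fun acc kv => kv.2.foldl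
        (fun a p => if od == p.1 then (if p.2 > a then p.2 else a) else a) acc) 0
      = (pvMatches od fs).foldl (fun a m => if m > a then m else a) 0 := by
  unfold pvMatches
  have hsw : (fun (acc : Int) (kv : String × List (String × Int)) => kv.2.foldl
        (fun a p => if od == p.1 then (if p.2 > a then p.2 else a) else a) acc)
      = (fun acc kv => kv.2.foldl
        (fun a p => if p.1 == od then (if p.2 > a then p.2 else a) else a) acc) := by
    funext acc kv
    refine congrArg (fun f => kv.2.foldl f acc) ?_
    funext a p
    have : (od == p.1) = (p.1 == od) := by
      cases h : (od == p.1) <;> cases h2 : (p.1 == od) <;> simp_all [BEq.comm]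
    rw [this]
  rw [hsw]
  have h1 : fs.foldl (fun acc kv => kv.2.foldl
        (fun a p => if p.1 == od then (if p.2 > a then p.2 else a) else a) acc) 0
      = fs.foldl (fun acc kv =>
          (kv.2.filterMap (fun p => if p.1 == od then some p.2 else none)).foldl
            (fun a m => if m > a then m else a) acc) 0 :=
    PySem.List.foldl_congr_mem _ _ _ _ (fun acc (kv : String × List (String × Int)) _ =>
      pv_foldl_filterMap od (fun a m => if m > a then m else a) kv.2 acc)
  exact h1.trans (pv_foldl_flatMap _ _ fs 0)

-- A's second pass computed over the flattened matches
theorem pvA_any (od : String) (fs : List (String × List (String × Int))) (most : Int) :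
    fs.any (fun kv => kv.2.any (fun p => p.2 == most && od == p.1))
      = (pvMatches od fs).any (fun m => m == most) := by
  unfold pvMatches
  simp only [List.any_flatMap, List.any_filterMap]
  refine congrArg _ (funext fun kv => congrArg _ (funext fun p => ?_))
  by_cases h : p.1 = od
  · simp [h, Bool.and_comm]
  · simp [h]
    exact fun _ he => h he.symm

-- B's pass computed over the flattened matches
theorem pvB_best (od : String) (fs : List (String × List (String × Int))) :
    fs.foldl (fun acc kv => kv.2.foldl
        (fun b p => if p.1 == od then
            (match b with
             | none => some p.2
             | some v => if p.2 > v then some p.2 else some v)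
          else b) acc) none
      = (pvMatches od fs).foldl
          (fun b m => match b with
            | none => some m
            | some v => if m > v then some m else some v) none := by
  unfold pvMatches
  have h1 : fs.foldl (fun acc kv => kv.2.foldl
        (fun b p => if p.1 == od then
            (match b with
             | none => some p.2
             | some v => if p.2 > v then some p.2 else some v)
          else b) acc) none
      = fs.foldl (fun acc kv =>
          (kv.2.filterMap (fun p => if p.1 == od then some p.2 else none)).foldl
            (fun b m => match b with
              | none => some m
              | some v => if m > v then some m else some v) acc) none :=
    PySem.List.foldl_congr_mem _ _ _ _ (fun acc (kv : String × List (String × Int)) _ =>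
      pv_foldl_filterMap od (fun b m => match b with
        | none => some m
        | some v => if m > v then some m else some v) kv.2 acc)
  exact h1.trans (pv_foldl_flatMap _ _ fs none)

-- facts about the running-max step  fun a m => if m > a then m else a
theorem pv_max_ge (ms : List Int) : ∀ a : Int, a ≤ ms.foldl (fun a m => if m > a then m else a) a := by
  induction ms with
  | nil => intro a; simp
  | cons m t ih =>
    intro a
    simp only [List.foldl_cons]
    split
    next h => exact le_trans (le_of_lt h) (ih m)
    next h => exact ih a

theorem pv_max_mem_le (ms : List Int) : ∀ a m : Int, m ∈ ms →
    m ≤ ms.foldl (fun a m => if m > a then m else a) a := by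
  induction ms with
  | nil => intro a m h; simp at h
  | cons x t ih =>
    intro a m h
    rcases List.mem_cons.mp h with h | h
    · subst h
      simp only [List.foldl_cons]
      split
      next hx => exact pv_max_ge t m
      next hx => exact le_trans (not_lt.mp hx) (pv_max_ge t a)
    · exact ih _ m h

theorem pv_max_cases (ms : List Int) : ∀ a : Int,
    ms.foldl (fun a m => if m > a then m else a) a = a
      ∨ ms.foldl (fun a m => if m > a then m else a) a ∈ ms := by
  induction ms with
  | nil => intro a; simp
  | cons x t ih =>
    intro a
    simp only [List.foldl_cons]
    rcases ih (if x > a then x else a) with h | h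
    · rw [h]
      split
      next => exact Or.inr (by simp)
      next => exact Or.inl rfl
    · exact Or.inr (List.mem_cons_of_mem _ h)

-- A's result over the flattened matches: there is a matching multiplicity ≥ 0
theorem pvA_flat (ms : List Int) :
    (ms.any fun m => m == ms.foldl (fun a m => if m > a then m else a) 0)
      = ms.any fun m => decide (0 ≤ m) := by
  set M := ms.foldl (fun a m => if m > a then m else a) 0 with hM
  have hM0 : (0 : Int) ≤ M := pv_max_ge ms 0
  apply Bool.eq_iff_iff.mpr
  simp only [List.any_eq_true, beq_iff_eq, decide_eq_true_eq]
  constructor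
  · rintro ⟨m, hm, hmeq⟩; exact ⟨m, hm, by omega⟩
  · rintro ⟨m, hm, hm0⟩
    rcases pv_max_cases ms 0 with h | h
    · have := pv_max_mem_le ms 0 m hm
      exact ⟨m, hm, by omega⟩
    · exact ⟨M, h, rfl⟩

-- A characterized: True iff some matching multiplicity is ≥ 0
theorem pvA_char (od : String) (fs : List (String × List (String × Int))) :
    reassociate_orphaned_descriptor od fs = (pvMatches od fs).any fun m => decide (0 ≤ m) := by
  unfold reassociate_orphaned_descriptor
  rw [pvA_most, pvA_any, pvA_flat]

-- B's fold starting from some v stays some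
theorem pvB_some (ms : List Int) : ∀ v : Int,
    ms.foldl (fun b m => match b with
        | none => some m
        | some v => if m > v then some m else some v) (some v)
      = some (ms.foldl (fun a m => if m > a then m else a) v) := by
  induction ms with
  | nil => intro v; rfl
  | cons x t ih =>
    intro v
    rw [List.foldl_cons, List.foldl_cons]
    have hred : (match some v with
        | none => some x
        | some v => if x > v then some x else some v) = (if x > v then some x else some v) := rfl
    rw [hred]
    split
    next h => exact ih x
    next h => exact ih v

-- B characterized: True iff there is a matching entry at all
theorem pvB_char (od : String) (fs : List (String × List (String × Int))) :
    reassociate_orphaned_descriptor_alt od fs = !(pvMatches od fs).isEmpty := by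
  unfold reassociate_orphaned_descriptor_alt
  rw [pvB_best]
  cases h : pvMatches od fs with
  | nil => rfl
  | cons x t => simp only [List.foldl_cons, pvB_some, List.isEmpty_cons, Bool.not_false]

-- membership in the flattened matches
theorem pv_mem_matches (od : String) (fs : List (String × List (String × Int))) (m : Int) :
    m ∈ pvMatches od fs ↔ ∃ kv ∈ fs, ∃ p ∈ kv.2, p.1 = od ∧ p.2 = m := by
  unfold pvMatches
  simp only [List.mem_flatMap, List.mem_filterMap]
  constructor
  · rintro ⟨kv, hkv, p, hp, hsome⟩
    by_cases h : p.1 = od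
    · refine ⟨kv, hkv, p, hp, h, ?_⟩
      simp [h] at hsome; omega
    · simp [h] at hsome
  · rintro ⟨kv, hkv, p, hp, h1, h2⟩
    exact ⟨kv, hkv, p, hp, by simp [h1, h2]⟩

-- Pre_ in terms of the flattened matches
theorem pvPre_char (od : String) (fs : List (String × List (String × Int))) :
    Pre_reassociate_orphaned_descriptor od fs ↔ ∀ m ∈ pvMatches od fs, 0 ≤ m := by
  unfold Pre_reassociate_orphaned_descriptor
  simp only [List.all_eq_true, Bool.or_eq_true, Bool.not_eq_eq_eq_not, Bool.not_true,
    beq_eq_false_iff_ne, ne_eq, decide_eq_true_eq]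
  constructor
  · intro h m hm
    rcases (pv_mem_matches od fs m).mp hm with ⟨kv, hkv, p, hp, h1, h2⟩
    rcases h kv hkv p hp with hc | hc
    · exact absurd h1 hc
    · omega
  · intro h kv hkv p hp
    by_cases hd : p.1 = od
    · exact Or.inr (h p.2 ((pv_mem_matches od fs p.2).mpr ⟨kv, hkv, p, hp, hd, rfl⟩))
    · exact Or.inl hd

-- ===== VERDICT (by name: the statement is the Claim_ definition above) =====
theorem reassociate_orphaned_descriptor_spec : Claim_equal_reassociate_orphaned_descriptor := by
  intro od fs _ hpre
  unfold Spec_reassociate_orphaned_descriptor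
  rw [pvA_char, pvB_char]
  have hall := (pvPre_char od fs).mp hpre
  cases h : pvMatches od fs with
  | nil => rfl
  | cons x t =>
    simp only [List.isEmpty_cons, Bool.not_false]
    have hx : (0 : Int) ≤ x := hall x (by rw [h]; exact List.mem_cons_self)
    exact List.any_eq_true.mpr ⟨x, List.mem_cons_self, by simpa using hx⟩
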